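-- pv_equiv track=rewrite | github.com/ShivamAtram25/Python-Codes | python_labs/new.py | countofDigit
-- ===== SOURCE A (Python) =====
-- def countofDigit(num):
--     odd_count = 0
--     even_count = 0
--     zero_count = 0
--
--     while(num> 0):
--        digit = num % 10
--
--        if digit == 0:
--            zero_count += 1
--
--        elif digit % 2 == 0:
--             even_count += 1
--
--        else:
--            odd_count += 1
--
--        num //= 10
--
--     return odd_count,even_count,zero_count
-- ===== SOURCE B (Python) =====
-- def countofDigit(num):
--     odd_count = 0
--     even_count = 0
--     zero_count = 0
--     if num > 0:
--         for ch in str(num):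
--             d = ord(ch) - 48
--             if d == 0:
--                 zero_count += 1
--             elif d % 2 == 0:
--                 even_count += 1
--             else:
--                 odd_count += 1
--     return odd_count, even_count, zero_count
-- ===== Notes on version B (the rewrite author's own statement) =====
-- stated objective: idiomatic
-- what changed: B extracts the digits from str(num) (one character per digit) instead of A's arithmetic mod-10/floor-div-10 while loop, keeping the same three-way classification and the (0,0,0) result for non-positive input.
import Mathlib
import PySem

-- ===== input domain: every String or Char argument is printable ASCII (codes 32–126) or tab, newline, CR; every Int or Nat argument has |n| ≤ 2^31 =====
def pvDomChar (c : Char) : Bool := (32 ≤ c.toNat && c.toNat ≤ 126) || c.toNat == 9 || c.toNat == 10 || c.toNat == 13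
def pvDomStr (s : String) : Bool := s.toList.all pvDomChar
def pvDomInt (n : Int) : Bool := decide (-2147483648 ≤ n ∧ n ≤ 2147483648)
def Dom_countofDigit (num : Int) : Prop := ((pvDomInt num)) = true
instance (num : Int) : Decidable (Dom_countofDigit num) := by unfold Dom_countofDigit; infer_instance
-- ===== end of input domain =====

-- B classifies the digits of str(num) instead of A's mod-10 / floor-div-10 while loop (idiomatic; same cost).

-- ===== PORT A =====
-- the while loop of A: state (num, odd_count, even_count, zero_count)
def countofDigitLoop (num odd_count even_count zero_count : Int) : Int × Int × Int :=
  if 0 < num then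
    let digit := PySem.Int.mod num 10
    if digit = 0 then
      countofDigitLoop (PySem.Int.floordiv num 10) odd_count even_count (zero_count + 1)
    else if PySem.Int.mod digit 2 = 0 then
      countofDigitLoop (PySem.Int.floordiv num 10) odd_count (even_count + 1) zero_count
    else
      countofDigitLoop (PySem.Int.floordiv num 10) (odd_count + 1) even_count zero_count
  else (odd_count, even_count, zero_count)
termination_by num.toNat
decreasing_by all_goals (rw [PySem.Int.floordiv_eq_ediv_of_pos (by omega)]; omega)

def countofDigit (num : Int) : Int × Int × Int :=
  countofDigitLoop num 0 0 0

-- ===== PORT B =====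
-- the body of B's for loop: d = ord(ch) - 48; three-way increment of (odd, even, zero)
def countofDigitStep (acc : Int × Int × Int) (ch : Char) : Int × Int × Int :=
  let d : Int := (ch.toNat : Int) - 48
  if d = 0 then (acc.1, acc.2.1, acc.2.2 + 1)
  else if PySem.Int.mod d 2 = 0 then (acc.1, acc.2.1 + 1, acc.2.2)
  else (acc.1 + 1, acc.2.1, acc.2.2)

def countofDigit_alt (num : Int) : Int × Int × Int :=
  if 0 < num then (PySem.Int.toStr num).toList.foldl countofDigitStep (0, 0, 0)
  else (0, 0, 0)

-- ===== PRECONDITION & SPEC =====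
def Spec_countofDigit (num : Int) (out : Int × Int × Int) : Prop := out = countofDigit_alt num
instance (num : Int) (out : Int × Int × Int) : Decidable (Spec_countofDigit num out) := by unfold Spec_countofDigit; infer_instance

-- ===== CLAIM (what is proved, stated in full; the proofs are below) =====
def Claim_equal_countofDigit : Prop := ∀ (num : Int), Dom_countofDigit num → Spec_countofDigit num (countofDigit num)

-- ===== LEMMAS AND PROOFS =====

-- one unfolding of A's loop when num > 0, with the let inlined
lemma pvLoop_pos (num o e z : Int) (h : 0 < num) :
    countofDigitLoop num o e z =
      if PySem.Int.mod num 10 = 0 then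
        countofDigitLoop (PySem.Int.floordiv num 10) o e (z + 1)
      else if PySem.Int.mod (PySem.Int.mod num 10) 2 = 0 then
        countofDigitLoop (PySem.Int.floordiv num 10) o (e + 1) z
      else
        countofDigitLoop (PySem.Int.floordiv num 10) (o + 1) e z := by
  rw [countofDigitLoop, if_pos h]

-- decimal digit characters of m, most significant first (what Nat.toDigits produces)
def pvDrev (m : Nat) : List Char :=
  if m < 10 then [Nat.digitChar m]
  else pvDrev (m / 10) ++ [Nat.digitChar (m % 10)]
termination_by m
decreasing_by exact Nat.div_lt_self (by omega) (by omega)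

lemma pvToDigitsCore_eq : ∀ (f m : Nat) (acc : List Char), m < f →
    Nat.toDigitsCore 10 f m acc = pvDrev m ++ acc := by
  intro f
  induction f with
  | zero => omega
  | succ f ih =>
    intro m acc hm
    rw [Nat.toDigitsCore]
    by_cases h : m < 10
    · rw [if_pos (by omega)]
      rw [pvDrev, if_pos h, Nat.mod_eq_of_lt h]
      rfl
    · rw [pvDrev, if_neg h, if_neg (by omega)]
      rw [ih (m / 10) _ (by omega)]
      simp

lemma pvToDigits_eq (m : Nat) : Nat.toDigits 10 m = pvDrev m := by
  have := pvToDigitsCore_eq (m + 1) m [] (Nat.lt_succ_self m)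
  simpa [Nat.toDigits] using this

lemma pvDigitChar_val (m : Nat) (h : m < 10) : (Nat.digitChar m).toNat = m + 48 := by
  interval_cases m <;> rfl

-- shifting the accumulator of B's fold
lemma pvFold_shift (l : List Char) : ∀ o e z : Int,
    l.foldl countofDigitStep (o, e, z) =
      (o + (l.foldl countofDigitStep (0, 0, 0)).1,
       e + (l.foldl countofDigitStep (0, 0, 0)).2.1,
       z + (l.foldl countofDigitStep (0, 0, 0)).2.2) := by
  induction l with
  | nil => intro o e z; simp
  | cons c l ih =>
    intro o e z
    simp only [List.foldl_cons, countofDigitStep]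
    split_ifs
    · rw [ih o e (z + 1), ih 0 0 (0 + 1)]; simp [Prod.ext_iff]; omega
    · rw [ih o (e + 1) z, ih 0 (0 + 1) 0]; simp [Prod.ext_iff]; omega
    · rw [ih (o + 1) e z, ih (0 + 1) 0 0]; simp [Prod.ext_iff]; omega

-- A's loop computes B's fold over the decimal digit characters
lemma pvMain (m : Nat) (hm : 0 < m) : ∀ o e z : Int,
    countofDigitLoop (m : Int) o e z = (pvDrev m).foldl countofDigitStep (o, e, z) := by
  induction m using Nat.strong_induction_on with
  | _ m ih =>
    intro o e z
    rw [pvLoop_pos _ _ _ _ (by exact_mod_cast hm)]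
    have hmod : PySem.Int.mod (m : Int) 10 = ((m % 10 : Nat) : Int) := PySem.Int.mod_natCast m 10
    have hdiv : PySem.Int.floordiv (m : Int) 10 = ((m / 10 : Nat) : Int) := PySem.Int.floordiv_natCast m 10
    have hm2 : PySem.Int.mod ((m % 10 : Nat) : Int) 2 = ((m % 10 % 2 : Nat) : Int) :=
      PySem.Int.mod_natCast _ 2
    have hd10 : m % 10 < 10 := Nat.mod_lt _ (by omega)
    have hstep : ∀ a : Int × Int × Int, countofDigitStep a (Nat.digitChar (m % 10)) =
        if ((m % 10 : Nat) : Int) = 0 then (a.1, a.2.1, a.2.2 + 1)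
        else if PySem.Int.mod ((m % 10 : Nat) : Int) 2 = 0 then (a.1, a.2.1 + 1, a.2.2)
        else (a.1 + 1, a.2.1, a.2.2) := by
      intro a
      simp only [countofDigitStep, pvDigitChar_val _ hd10]
      have harg : ((m % 10 + 48 : Nat) : Int) - 48 = ((m % 10 : Nat) : Int) := by
        push_cast; ring
      rw [harg]
    by_cases h : m < 10
    · -- single digit: m % 10 = m ≠ 0, m / 10 = 0
      rw [pvDrev, if_pos h]
      simp only [List.foldl_cons, List.foldl_nil]
      have hmm : m % 10 = m := Nat.mod_eq_of_lt h
      rw [hmm] at hstep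
      rw [hstep, hmod, hmm, hdiv, Nat.div_eq_of_lt h]
      split_ifs <;> (rw [countofDigitLoop]; norm_num)
    · -- m ≥ 10: last digit m % 10, rest m / 10
      rw [pvDrev, if_neg h, List.foldl_append]
      have hq : 0 < m / 10 := Nat.div_pos (by omega) (by omega)
      have hlt : m / 10 < m := Nat.div_lt_self hm (by omega)
      simp only [List.foldl_cons, List.foldl_nil]
      rw [hstep, hmod]
      split_ifs
      · rw [hdiv, ih _ hlt hq, pvFold_shift _ o e (z + 1), pvFold_shift _ o e z]
        simp [Prod.ext_iff]; omega
      · rw [hdiv, ih _ hlt hq, pvFold_shift _ o (e + 1) z, pvFold_shift _ o e z]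
        simp [Prod.ext_iff]; omega
      · rw [hdiv, ih _ hlt hq, pvFold_shift _ (o + 1) e z, pvFold_shift _ o e z]
        simp [Prod.ext_iff]; omega

-- ===== VERDICT (by name: the statement is the Claim_ definition above) =====
theorem countofDigit_spec : Claim_equal_countofDigit := by
  intro num _
  unfold Spec_countofDigit countofDigit countofDigit_alt
  by_cases h : 0 < num
  · have ht : PySem.Int.toChars num = pvDrev num.toNat := by
      simp only [PySem.Int.toChars, if_neg (by omega : ¬ num < 0)]
      exact pvToDigits_eq num.toNat
    rw [if_pos h, PySem.Int.toList_toStr, ht]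
    conv_lhs => rw [show num = ((num.toNat : Nat) : Int) from (Int.toNat_of_nonneg (le_of_lt h)).symm]
    rw [pvMain num.toNat (by omega)]
  · rw [if_neg h, countofDigitLoop, if_neg h]
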